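-- pv_equiv track=rewrite | github.com/Keetasin/Black_Jack_Probability | cards.py | prob_blackjack
-- ===== SOURCE A (Python) =====
-- def prob_blackjack(deck, dealer_total, player_total):
--     left_card = len(deck)
--     tie = 0
--     dealer_win = 0
--     player_win = 0
--     dealer_pick_card_4 = 0
--
--     for i in range(left_card):
--         card = deck[i]
--         dealer_new_total = dealer_total + card
--
--         if card == 11 and dealer_new_total > 21:
--             dealer_new_total = dealer_new_total - 10
--
--         # Blackjack
--         if player_total == 21 or dealer_total == 21 or dealer_new_total == 21:
--             if dealer_total == 21 and player_total == 21:
--                 tie += 1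
--             elif dealer_total == 21:
--                 dealer_win += 1
--             # ในกรณี dealer แต้มไม่ถึง 17 สามารถจั่วไพ่เพิ่มได้เรื่อยๆ
--             elif dealer_new_total == 21 and player_total == 21:
--                 tie += 1
--             elif dealer_new_total == 21:
--                 dealer_win += 1
--             else:
--                 player_win += 1
--
--         # player bust
--         elif player_total > 21:
--             dealer_win += 1
--
--         elif 17 <= dealer_new_total <= 21:
--             if dealer_new_total > player_total:
--                 dealer_win += 1
--             elif dealer_new_total < player_total:
--                 player_win += 1
--             else:
--                 tie += 1
--
--         elif dealer_new_total < 17: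
--             dealer_pick_card_4 += 1
--
--         # Dealer bust
--         elif dealer_new_total > 21:
--             player_win += 1
--
--     return tie, dealer_win, player_win, dealer_pick_card_4
-- ===== SOURCE B (Python) =====
-- def _classify(card, dealer_total, player_total):
--     """Bucket index for one drawn card: 0=tie, 1=dealer_win, 2=player_win, 3=dealer_pick_card_4."""
--     dealer_new_total = dealer_total + card
--     if card == 11 and dealer_new_total > 21:
--         dealer_new_total = dealer_new_total - 10
--     if player_total == 21 or dealer_total == 21 or dealer_new_total == 21:
--         if dealer_total == 21 and player_total == 21:
--             return 0
--         if dealer_total == 21: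
--             return 1
--         if dealer_new_total == 21 and player_total == 21:
--             return 0
--         if dealer_new_total == 21:
--             return 1
--         return 2
--     if player_total > 21:
--         return 1
--     if 17 <= dealer_new_total <= 21:
--         if dealer_new_total > player_total:
--             return 1
--         if dealer_new_total < player_total:
--             return 2
--         return 0
--     if dealer_new_total < 17:
--         return 3
--     return 2
--
--
-- def prob_blackjack(deck, dealer_total, player_total):
--     # Tabulate the deck once, then classify each DISTINCT card value a single
--     # time and add its multiplicity to the matching bucket.
--     freq = {}
--     for card in deck:
--         freq[card] = freq.get(card, 0) + 1
--     buckets = [0, 0, 0, 0]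
--     for card, n in freq.items():
--         buckets[_classify(card, dealer_total, player_total)] += n
--     return buckets[0], buckets[1], buckets[2], buckets[3]
-- ===== Notes on version B (the rewrite author's own statement) =====
-- stated objective: alternative
-- what changed: B first tabulates the deck into a value->multiplicity dict and then runs the classification once per distinct card value, adding the multiplicity to the chosen bucket, instead of A's per-card loop that increments a bucket by 1 for every card.
import Mathlib
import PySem

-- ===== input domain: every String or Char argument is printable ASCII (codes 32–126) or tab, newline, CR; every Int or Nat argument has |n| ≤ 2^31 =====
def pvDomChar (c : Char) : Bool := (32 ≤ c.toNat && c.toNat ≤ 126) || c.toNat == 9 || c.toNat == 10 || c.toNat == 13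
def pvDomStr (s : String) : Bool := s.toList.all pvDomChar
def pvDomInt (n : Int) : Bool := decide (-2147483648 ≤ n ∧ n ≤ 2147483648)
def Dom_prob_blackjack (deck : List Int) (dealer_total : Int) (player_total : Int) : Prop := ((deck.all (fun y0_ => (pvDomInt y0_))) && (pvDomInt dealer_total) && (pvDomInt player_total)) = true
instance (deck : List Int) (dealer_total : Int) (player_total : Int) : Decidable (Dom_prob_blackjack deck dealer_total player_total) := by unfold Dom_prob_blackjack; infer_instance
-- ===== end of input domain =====

-- B tabulates the deck into a value→multiplicity dict and classifies each DISTINCT card value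
-- once, adding its multiplicity to the chosen bucket (objective: alternative decomposition).

-- ===== PORT A =====
-- dealer_new_total after the soft-ace adjustment (shared shape of A's two lines computing it)
def pvNewTotal (dealer_total card : Int) : Int :=
  if card = 11 ∧ dealer_total + card > 21 then dealer_total + card - 10
  else dealer_total + card

-- A's loop body: classify one card and bump the matching counter by 1
def pvStepA (dealer_total player_total : Int) (st : Int × Int × Int × Int) (card : Int) :
    Int × Int × Int × Int :=
  let dealer_new_total := pvNewTotal dealer_total card
  if player_total = 21 ∨ dealer_total = 21 ∨ dealer_new_total = 21 then
    if dealer_total = 21 ∧ player_total = 21 then (st.1 + 1, st.2.1, st.2.2.1, st.2.2.2)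
    else if dealer_total = 21 then (st.1, st.2.1 + 1, st.2.2.1, st.2.2.2)
    else if dealer_new_total = 21 ∧ player_total = 21 then (st.1 + 1, st.2.1, st.2.2.1, st.2.2.2)
    else if dealer_new_total = 21 then (st.1, st.2.1 + 1, st.2.2.1, st.2.2.2)
    else (st.1, st.2.1, st.2.2.1 + 1, st.2.2.2)
  else if player_total > 21 then (st.1, st.2.1 + 1, st.2.2.1, st.2.2.2)
  else if 17 ≤ dealer_new_total ∧ dealer_new_total ≤ 21 then
    if dealer_new_total > player_total then (st.1, st.2.1 + 1, st.2.2.1, st.2.2.2)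
    else if dealer_new_total < player_total then (st.1, st.2.1, st.2.2.1 + 1, st.2.2.2)
    else (st.1 + 1, st.2.1, st.2.2.1, st.2.2.2)
  else if dealer_new_total < 17 then (st.1, st.2.1, st.2.2.1, st.2.2.2 + 1)
  else if dealer_new_total > 21 then (st.1, st.2.1, st.2.2.1 + 1, st.2.2.2)
  else st

def prob_blackjack (deck : List Int) (dealer_total : Int) (player_total : Int) :
    Int × Int × Int × Int :=
  let left_card : Int := deck.length
  (PySem.List.pyRange 0 left_card 1).foldl
    (fun st i => pvStepA dealer_total player_total st (PySem.List.pyGetD deck i 0))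
    (0, 0, 0, 0)

-- ===== PORT B =====
-- Source B's _classify: bucket index 0=tie, 1=dealer_win, 2=player_win, 3=dealer_pick_card_4
def pvClassify (card dealer_total player_total : Int) : Nat :=
  let dealer_new_total := pvNewTotal dealer_total card
  if player_total = 21 ∨ dealer_total = 21 ∨ dealer_new_total = 21 then
    if dealer_total = 21 ∧ player_total = 21 then 0
    else if dealer_total = 21 then 1
    else if dealer_new_total = 21 ∧ player_total = 21 then 0
    else if dealer_new_total = 21 then 1
    else 2
  else if player_total > 21 then 1
  else if 17 ≤ dealer_new_total ∧ dealer_new_total ≤ 21 then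
    if dealer_new_total > player_total then 1
    else if dealer_new_total < player_total then 2
    else 0
  else if dealer_new_total < 17 then 3
  else 2

-- Source B's second loop body: buckets[_classify(card, …)] += n
def pvStepB (dealer_total player_total : Int) (b : Int × Int × Int × Int) (p : Int × Int) :
    Int × Int × Int × Int :=
  match pvClassify p.1 dealer_total player_total with
  | 0 => (b.1 + p.2, b.2.1, b.2.2.1, b.2.2.2)
  | 1 => (b.1, b.2.1 + p.2, b.2.2.1, b.2.2.2)
  | 2 => (b.1, b.2.1, b.2.2.1 + p.2, b.2.2.2)
  | _ => (b.1, b.2.1, b.2.2.1, b.2.2.2 + p.2)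

def prob_blackjack_alt (deck : List Int) (dealer_total : Int) (player_total : Int) :
    Int × Int × Int × Int :=
  let freq : PySem.Dict Int Int :=
    deck.foldl (fun d card => d.insert card (d.getD card 0 + 1)) PySem.Dict.empty
  freq.items.foldl (pvStepB dealer_total player_total) (0, 0, 0, 0)

-- ===== PRECONDITION & SPEC =====
def Spec_prob_blackjack (deck : List Int) (dealer_total : Int) (player_total : Int) (out : Int × Int × Int × Int) : Prop := out = prob_blackjack_alt deck dealer_total player_total
instance (deck : List Int) (dealer_total : Int) (player_total : Int) (out : Int × Int × Int × Int) : Decidable (Spec_prob_blackjack deck dealer_total player_total out) := by unfold Spec_prob_blackjack; infer_instance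

-- ===== CLAIM (what is proved, stated in full; the proofs are below) =====
def Claim_equal_prob_blackjack : Prop := ∀ (deck : List Int) (dealer_total : Int) (player_total : Int), Dom_prob_blackjack deck dealer_total player_total → Spec_prob_blackjack deck dealer_total player_total (prob_blackjack deck dealer_total player_total)

-- ===== LEMMAS AND PROOFS =====

-- the per-card contribution vector: a unit vector in the bucket pvClassify picks
def pvVec (dealer_total player_total card : Int) : Int × Int × Int × Int :=
  match pvClassify card dealer_total player_total with
  | 0 => (1, 0, 0, 0)
  | 1 => (0, 1, 0, 0)
  | 2 => (0, 0, 1, 0)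
  | _ => (0, 0, 0, 1)

def pvScale (n : Int) (v : Int × Int × Int × Int) : Int × Int × Int × Int :=
  (n * v.1, n * v.2.1, n * v.2.2.1, n * v.2.2.2)

lemma pvStepA_eq (dealer_total player_total : Int) (st : Int × Int × Int × Int) (card : Int) :
    pvStepA dealer_total player_total st card = st + pvVec dealer_total player_total card := by
  simp only [pvStepA, pvVec, pvClassify]
  split_ifs <;> simp [Prod.ext_iff] <;> omega

lemma pvFoldA (dealer_total player_total : Int) (l : List Int) (t : Int × Int × Int × Int) :
    l.foldl (pvStepA dealer_total player_total) t
      = t + (l.map (pvVec dealer_total player_total)).sum := by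
  induction l generalizing t with
  | nil => simp
  | cons c xs ih =>
    simp only [List.foldl_cons, List.map_cons, List.sum_cons, ih, pvStepA_eq]
    abel

lemma pvStepB_eq (dealer_total player_total : Int) (b : Int × Int × Int × Int) (p : Int × Int) :
    pvStepB dealer_total player_total b p
      = b + pvScale p.2 (pvVec dealer_total player_total p.1) := by
  simp only [pvStepB, pvVec, pvScale]
  rcases h : pvClassify p.1 dealer_total player_total with _ | _ | _ | k <;>
    simp [Prod.ext_iff]

lemma pvFoldB (dealer_total player_total : Int) (l : List (Int × Int))
    (t : Int × Int × Int × Int) :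
    l.foldl (pvStepB dealer_total player_total) t
      = t + (l.map (fun p => pvScale p.2 (pvVec dealer_total player_total p.1))).sum := by
  induction l generalizing t with
  | nil => simp
  | cons c xs ih =>
    simp only [List.foldl_cons, List.map_cons, List.sum_cons, ih, pvStepB_eq]
    abel

lemma pvScale_natCast (m : ℕ) (v : Int × Int × Int × Int) : pvScale (m : Int) v = m • v := by
  simp [pvScale, Prod.ext_iff, nsmul_eq_mul]

-- grouping identity: summing a value function over the deck equals summing it
-- count-weighted over the distinct values (first occurrences, PySem.Set.ofList)
lemma pvSumGroup {M : Type} [AddCommMonoid M] (l : List Int) (g : Int → M) :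
    ((PySem.Set.ofList l).map (fun k => l.count k • g k)).sum = (l.map g).sum := by
  classical
  have h1 := Finset.sum_multiset_map_count (l : Multiset Int) g
  have h2 : l.toFinset = (PySem.Set.ofList l).toFinset := by
    ext x; simp [PySem.Set.mem_ofList]
  have h3 := List.sum_toFinset (fun k => l.count k • g k)
      (PySem.Set.nodup_ofList (xs := l))
  calc ((PySem.Set.ofList l).map (fun k => l.count k • g k)).sum
      = ∑ k ∈ (PySem.Set.ofList l).toFinset, l.count k • g k := h3.symm
    _ = ∑ k ∈ l.toFinset, l.count k • g k := by rw [h2]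
    _ = (l.map g).sum := by simpa using h1.symm

lemma pvA_closed (deck : List Int) (dealer_total player_total : Int) :
    prob_blackjack deck dealer_total player_total
      = (deck.map (pvVec dealer_total player_total)).sum := by
  unfold prob_blackjack
  rw [PySem.List.foldl_pyRange_zero_pyGetD' deck 0
      (pvStepA dealer_total player_total) (0, 0, 0, 0), pvFoldA]
  have h0 : ((0, 0, 0, 0) : Int × Int × Int × Int) = 0 := rfl
  rw [h0, zero_add]

lemma pvB_closed (deck : List Int) (dealer_total player_total : Int) :
    prob_blackjack_alt deck dealer_total player_total
      = ((PySem.Set.ofList deck).map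
          (fun k => pvScale (deck.count k : Int) (pvVec dealer_total player_total k))).sum := by
  unfold prob_blackjack_alt
  rw [PySem.Dict.foldl_insert_getD_add_one_eq_counter]
  simp only [PySem.Dict.items_counter]
  rw [pvFoldB, List.map_map]
  have h0 : ((0, 0, 0, 0) : Int × Int × Int × Int) = 0 := rfl
  rw [h0, zero_add]
  rfl

-- ===== VERDICT (by name: the statement is the Claim_ definition above) =====
theorem prob_blackjack_spec : Claim_equal_prob_blackjack := by
  intro deck dealer_total player_total _
  unfold Spec_prob_blackjack
  rw [pvA_closed, pvB_closed]
  have : ((PySem.Set.ofList deck).map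
      (fun k => pvScale (deck.count k : Int) (pvVec dealer_total player_total k))).sum
      = ((PySem.Set.ofList deck).map
      (fun k => deck.count k • pvVec dealer_total player_total k)).sum := by
    simp [pvScale_natCast]
  rw [this, pvSumGroup]
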